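-- pv_equiv track=rewrite | github.com/Jerry2003826/nivida | src/teacher/atomic_ops.py | candidate_params
-- ===== SOURCE A (Python) =====
-- from typing import Any, Iterable
--
-- def candidate_params(examples: list[tuple[str, str]]) -> list[dict[str, Any]]:
--     delete_chars: set[str] = set()
--     for input_text, output_text in examples:
--         input_chars = list(input_text)
--         output_chars = list(output_text)
--         output_index = 0
--         current_delete: set[str] = set()
--         for char in input_chars:
--             if output_index < len(output_chars) and char == output_chars[output_index]:
--                 output_index += 1
--             else:
--                 current_delete.add(char)
--         if output_index != len(output_chars):
--             return []
--         reconstructed = "".join(char for char in input_text if char not in current_delete)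
--         if reconstructed != output_text:
--             return []
--         delete_chars |= current_delete
--     if not delete_chars:
--         return []
--     return [{"delete_chars": "".join(sorted(delete_chars))}]
-- ===== SOURCE B (Python) =====
-- def candidate_params(examples):
--     delete_chars = set()
--     for input_text, output_text in examples:
--         delete = {c for c in input_text if c not in output_text}
--         reconstructed = "".join(c for c in input_text if c not in delete)
--         if reconstructed != output_text:
--             return []
--         delete_chars |= delete
--     if not delete_chars:
--         return []
--     return [{"delete_chars": "".join(sorted(delete_chars))}]
-- ===== Notes on version B (the rewrite author's own statement) =====
-- stated objective: simpler
-- what changed: Per example, the deletable set is computed directly as {c in input_text not in output_text} (a set-membership characterization), eliminating A's greedy output_index subsequence-pointer loop and its per-character index bookkeeping; the reconstruct-and-verify pass, union accumulation and sorted-join return are kept.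
import Mathlib
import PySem

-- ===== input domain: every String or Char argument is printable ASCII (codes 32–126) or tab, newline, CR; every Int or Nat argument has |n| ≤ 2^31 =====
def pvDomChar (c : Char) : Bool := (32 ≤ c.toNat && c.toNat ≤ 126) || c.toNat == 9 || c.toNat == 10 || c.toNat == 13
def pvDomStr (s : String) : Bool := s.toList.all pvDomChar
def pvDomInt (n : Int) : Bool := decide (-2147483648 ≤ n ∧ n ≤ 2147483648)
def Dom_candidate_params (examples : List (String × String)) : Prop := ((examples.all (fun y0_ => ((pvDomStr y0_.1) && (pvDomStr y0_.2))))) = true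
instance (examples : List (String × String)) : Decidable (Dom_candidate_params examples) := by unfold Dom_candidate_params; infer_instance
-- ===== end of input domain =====

-- B replaces A's greedy output_index pointer scan by a direct set-membership
-- characterisation ({c in input not in output}), keeping the verify pass; objective: simpler.

-- ===== PORT A =====
-- inner 'for char in input_chars' loop: state (output_index, current_delete), branches in A's order
def pvGreedy (outL : List Char) : List Char → Nat → PySem.Set Char → Nat × PySem.Set Char
  | [], idx, del => (idx, del)
  | c :: cs, idx, del =>
    if idx < outL.length ∧ c = outL.getD idx ' ' then
      pvGreedy outL cs (idx + 1) del
    else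
      pvGreedy outL cs idx (PySem.Set.add del c)

-- outer 'for input_text, output_text in examples' loop; none = the early 'return []'
def pvALoop : List (String × String) → PySem.Set Char → Option (PySem.Set Char)
  | [], acc => some acc
  | (it, ot) :: rest, acc =>
    let st := pvGreedy ot.toList it.toList 0 PySem.Set.empty
    if st.1 ≠ ot.toList.length then none
    else if it.toList.filter (fun c => !(PySem.Set.contains st.2 c)) ≠ ot.toList then none
    else pvALoop rest (PySem.Set.union acc st.2)

def candidate_params (examples : List (String × String)) : List (List (String × String)) :=
  match pvALoop examples PySem.Set.empty with
  | none => []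
  | some del =>
    if del.isEmpty then []
    else [[("delete_chars", String.mk (PySem.List.sorted del (fun c => c) false))]]

-- ===== PORT B =====
def pvBLoop : List (String × String) → PySem.Set Char → Option (PySem.Set Char)
  | [], acc => some acc
  | (it, ot) :: rest, acc =>
    let del := PySem.Set.ofList (it.toList.filter (fun c => !(ot.toList.contains c)))
    if it.toList.filter (fun c => !(PySem.Set.contains del c)) ≠ ot.toList then none
    else pvBLoop rest (PySem.Set.union acc del)

def candidate_params_alt (examples : List (String × String)) : List (List (String × String)) :=
  match pvBLoop examples PySem.Set.empty with
  | none => []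
  | some del =>
    if del.isEmpty then []
    else [[("delete_chars", String.mk (PySem.List.sorted del (fun c => c) false))]]

-- ===== PRECONDITION & SPEC =====
def Spec_candidate_params (examples : List (String × String)) (out : List (List (String × String))) : Prop := out = candidate_params_alt examples
instance (examples : List (String × String)) (out : List (List (String × String))) : Decidable (Spec_candidate_params examples out) := by unfold Spec_candidate_params; infer_instance

-- ===== CLAIM (what is proved, stated in full; the proofs are below) =====
def Claim_equal_candidate_params : Prop := ∀ (examples : List (String × String)), Dom_candidate_params examples → Spec_candidate_params examples (candidate_params examples)

-- ===== LEMMAS AND PROOFS =====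

-- when the output is exactly the p-filtered input suffix-wise, the greedy pointer matches all of it
-- and the deleted set is the foldl-add of the non-p characters
theorem pvGreedy_filter (outL : List Char) (p : Char → Bool) :
    ∀ (inp : List Char) (idx : Nat) (del : PySem.Set Char),
      outL.drop idx = inp.filter p → idx ≤ outL.length →
      pvGreedy outL inp idx del
        = (outL.length, (inp.filter (fun c => !(p c))).foldl PySem.Set.add del) := by
  intro inp
  induction inp with
  | nil =>
    intro idx del h hle
    have : outL.length ≤ idx := List.drop_eq_nil_iff.mp (by simpa using h)
    have : idx = outL.length := le_antisymm hle this
    simp [pvGreedy, this]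
  | cons c cs ih =>
    intro idx del h hle
    by_cases hpc : p c = true
    · have hfil : (c :: cs).filter p = c :: cs.filter p := by simp [hpc]
      rw [hfil] at h
      have hne : outL.drop idx ≠ [] := by rw [h]; simp
      have hlt : idx < outL.length := by
        by_contra hge
        exact hne (List.drop_eq_nil_iff.mpr (by omega))
      have hget : outL.getD idx ' ' = c := by
        have h0 : (outL.drop idx)[0]? = some c := by rw [h]; rfl
        have : outL[idx]? = some c := by
          rw [← h0, List.getElem?_drop]; simp
        simp [List.getD, this]
      have hd1 : outL.drop (idx + 1) = cs.filter p := by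
        have : outL.drop (idx + 1) = (outL.drop idx).drop 1 := by
          rw [List.drop_drop]
        rw [this, h]; rfl
      rw [pvGreedy, if_pos ⟨hlt, hget.symm⟩, ih (idx + 1) del hd1 (by omega)]
      simp [hpc]
    · have hfil : (c :: cs).filter p = cs.filter p := by simp [hpc]
      rw [hfil] at h
      have hguard : ¬ (idx < outL.length ∧ c = outL.getD idx ' ') := by
        rintro ⟨hlt, hceq⟩
        have hne : outL.drop idx ≠ [] := by
          intro hnil
          have := List.drop_eq_nil_iff.mp hnil; omega
        rcases hdrop : outL.drop idx with _ | ⟨o, os⟩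
        · exact hne hdrop
        · have hpo : p o = true := by
            have : o ∈ cs.filter p := by rw [← h, hdrop]; exact List.mem_cons_self
            exact (List.mem_filter.mp this).2
          have hget : outL.getD idx ' ' = o := by
            have h0 : (outL.drop idx)[0]? = some o := by rw [hdrop]; rfl
            have : outL[idx]? = some o := by rw [← h0, List.getElem?_drop]; simp
            simp [List.getD, this]
          rw [hget] at hceq
          rw [hceq] at hpc
          exact hpc hpo
      rw [pvGreedy, if_neg hguard, ih idx (PySem.Set.add del c) h hle]
      simp [hpc]

-- every already-deleted character, and every input character absent from the output, ends up deleted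
theorem pvGreedy_mem (outL : List Char) :
    ∀ (inp : List Char) (idx : Nat) (del : PySem.Set Char) (c : Char),
      (c ∈ del ∨ (c ∈ inp ∧ outL.contains c = false)) →
      c ∈ (pvGreedy outL inp idx del).2 := by
  intro inp
  induction inp with
  | nil =>
    intro idx del c h
    rcases h with h | ⟨h, _⟩
    · simpa [pvGreedy] using h
    · simp at h
  | cons a cs ih =>
    intro idx del c h
    by_cases hg : idx < outL.length ∧ a = outL.getD idx ' '
    · rw [pvGreedy, if_pos hg]
      apply ih
      rcases h with h | ⟨hmem, hno⟩
      · exact Or.inl h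
      · rcases List.mem_cons.mp hmem with rfl | hcs
        · exfalso
          have : outL.getD idx ' ' ∈ outL := by
            rw [List.getD_eq_getElem outL ' ' hg.1]
            exact List.getElem_mem _
          rw [← hg.2] at this
          have hco : outL.contains c = true := List.contains_iff_mem.mpr this
          rw [hco] at hno; exact Bool.noConfusion hno
        · exact Or.inr ⟨hcs, hno⟩
    · rw [pvGreedy, if_neg hg]
      apply ih
      rcases h with h | ⟨hmem, hno⟩
      · exact Or.inl ((PySem.Set.mem_add _ _ _).mpr (Or.inl h))
      · rcases List.mem_cons.mp hmem with rfl | hcs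
        · exact Or.inl ((PySem.Set.mem_add _ _ _).mpr (Or.inr rfl))
        · exact Or.inr ⟨hcs, hno⟩

theorem pvLoop_eq : ∀ (l : List (String × String)) (acc : PySem.Set Char),
    pvALoop l acc = pvBLoop l acc := by
  intro l
  induction l with
  | nil => intro acc; rfl
  | cons ex rest ih =>
    intro acc
    obtain ⟨it, ot⟩ := ex
    set inpL := it.toList with hinp
    set outL := ot.toList with hout
    set D : PySem.Set Char := PySem.Set.ofList (inpL.filter (fun c => !(outL.contains c))) with hD
    have hDmem : ∀ c : Char, c ∈ D ↔ (c ∈ inpL ∧ outL.contains c = false) := by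
      intro c
      rw [hD, PySem.Set.mem_ofList, List.mem_filter]
      simp
    have hrec : inpL.filter (fun c => !(PySem.Set.contains D c))
        = inpL.filter (fun c => outL.contains c) := by
      apply List.filter_congr
      intro c hc
      by_cases hcD : c ∈ D
      · have hno : c ∉ outL := by
          have h2 := ((hDmem c).mp hcD).2
          simpa [List.contains_iff_mem] using fun hm => by rw [List.contains_iff_mem.mpr hm] at h2; exact Bool.noConfusion h2
        simp [PySem.Set.contains, hcD, hno]
      · have hco : c ∈ outL := by
          by_contra hx
          exact hcD ((hDmem c).mpr ⟨hc, by simpa [List.contains_iff_mem] using hx⟩)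
        simp [PySem.Set.contains, hcD, hco]
    by_cases hP : inpL.filter (fun c => outL.contains c) = outL
    all_goals have hP' : (inpL.filter (fun c => decide (c ∈ outL)) = outL) ↔ (inpL.filter (fun c => outL.contains c) = outL) := by simp
    · -- both succeed on this example with the same deleted set D
      have hgr : pvGreedy outL inpL 0 PySem.Set.empty
          = (outL.length, (inpL.filter (fun c => !(outL.contains c))).foldl PySem.Set.add PySem.Set.empty) :=
        pvGreedy_filter outL (fun c => outL.contains c) inpL 0 PySem.Set.empty
          (by simpa using hP.symm) (Nat.zero_le _)
      have hfold : (inpL.filter (fun c => !(outL.contains c))).foldl PySem.Set.add PySem.Set.empty = D := by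
        rw [hD, PySem.Set.ofList_eq_foldl]; rfl
      show (let st := pvGreedy outL inpL 0 PySem.Set.empty
            if st.1 ≠ outL.length then none
            else if inpL.filter (fun c => !(PySem.Set.contains st.2 c)) ≠ outL then none
            else pvALoop rest (PySem.Set.union acc st.2))
          = (let del := D
             if inpL.filter (fun c => !(PySem.Set.contains del c)) ≠ outL then none
             else pvBLoop rest (PySem.Set.union acc del))
      simp only [hgr, hfold]
      rw [if_neg (by simp), hrec, if_neg (by simp [hP'.mpr hP]), if_neg (by simp [hP'.mpr hP])]
      exact ih _
    · -- both fail on this example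
      have hB : (let del := D
                 if inpL.filter (fun c => !(PySem.Set.contains del c)) ≠ outL then none
                 else pvBLoop rest (PySem.Set.union acc del)) = none := by
        simp only []
        rw [hrec, if_pos hP]
      show (let st := pvGreedy outL inpL 0 PySem.Set.empty
            if st.1 ≠ outL.length then none
            else if inpL.filter (fun c => !(PySem.Set.contains st.2 c)) ≠ outL then none
            else pvALoop rest (PySem.Set.union acc st.2))
          = (let del := D
             if inpL.filter (fun c => !(PySem.Set.contains del c)) ≠ outL then none
             else pvBLoop rest (PySem.Set.union acc del))
      rw [hB]
      simp only []
      set st := pvGreedy outL inpL 0 PySem.Set.empty with hst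
      by_cases h1 : st.1 ≠ outL.length
      · rw [if_pos h1]
      · rw [if_neg h1]
        by_cases h2 : inpL.filter (fun c => !(PySem.Set.contains st.2 c)) ≠ outL
        · rw [if_pos h2]
        · exfalso
          rw [ne_eq, not_not] at h2
          apply hP
          rw [← h2]
          apply List.filter_congr
          intro c hc
          by_cases hcs : c ∈ st.2
          · have hco : c ∉ outL := by
              intro hcout
              rw [← h2] at hcout
              have := (List.mem_filter.mp hcout).2
              simp [PySem.Set.contains, hcs] at this
            simp [PySem.Set.contains, hcs, hc]
          · have hco : c ∈ outL := by
              by_contra hx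
              exact hcs (pvGreedy_mem outL inpL 0 PySem.Set.empty c
                (Or.inr ⟨hc, by simpa [List.contains_iff_mem] using hx⟩))
            simp [PySem.Set.contains, hcs, hc]

-- ===== VERDICT (by name: the statement is the Claim_ definition above) =====
theorem candidate_params_spec : Claim_equal_candidate_params := by
  intro examples _
  unfold Spec_candidate_params candidate_params candidate_params_alt
  rw [pvLoop_eq]
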